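-- pv_equiv track=rewrite | github.com/tnoff/discord-bot | discord_bot/cogs/music_helpers/message_context.py | _find_exact_content_matches
-- ===== SOURCE A (Python) =====
-- from typing import Callable, List
--
-- def _find_exact_content_matches(old_content: List[str], new_content: List[str]) -> dict:
--     '''
--     Find exact content matches between old and new content lists.
--     Returns mapping of old_index -> new_index for exact matches.
--
--     old_content: List of existing message content
--     new_content: List of new message content
--
--     Returns: dict mapping old_index -> new_index for exact matches
--     '''
--     matches = {}
--     used_new_indices = set()
--
--     # For each old content, find first unused exact match in new content
--     for old_idx, old_text in enumerate(old_content):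
--         for new_idx, new_text in enumerate(new_content):
--             if new_idx not in used_new_indices and old_text == new_text:
--                 matches[old_idx] = new_idx
--                 used_new_indices.add(new_idx)
--                 break
--
--     return matches
-- ===== SOURCE B (Python) =====
-- def _find_exact_content_matches(old_content, new_content):
--     # Index every new text once: text -> ordered list of its indices in new_content.
--     occurrences = {}
--     for new_idx, text in enumerate(new_content):
--         occurrences.setdefault(text, []).append(new_idx)
--     # Consume that list front-to-back as old texts arrive (cursor per text).
--     matches = {}
--     seen = {}
--     for old_idx, text in enumerate(old_content):
--         k = seen.get(text, 0)
--         seen[text] = k + 1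
--         queue = occurrences.get(text, [])
--         if k < len(queue):
--             matches[old_idx] = queue[k]
--     return matches
-- ===== Notes on version B (the rewrite author's own statement) =====
-- stated objective: faster
-- what changed: Replaced the per-old-element linear scan of new_content with a prebuilt dict mapping each text to its ordered list of new indices, consumed via a per-text cursor, removing the inner loop.
import Mathlib
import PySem

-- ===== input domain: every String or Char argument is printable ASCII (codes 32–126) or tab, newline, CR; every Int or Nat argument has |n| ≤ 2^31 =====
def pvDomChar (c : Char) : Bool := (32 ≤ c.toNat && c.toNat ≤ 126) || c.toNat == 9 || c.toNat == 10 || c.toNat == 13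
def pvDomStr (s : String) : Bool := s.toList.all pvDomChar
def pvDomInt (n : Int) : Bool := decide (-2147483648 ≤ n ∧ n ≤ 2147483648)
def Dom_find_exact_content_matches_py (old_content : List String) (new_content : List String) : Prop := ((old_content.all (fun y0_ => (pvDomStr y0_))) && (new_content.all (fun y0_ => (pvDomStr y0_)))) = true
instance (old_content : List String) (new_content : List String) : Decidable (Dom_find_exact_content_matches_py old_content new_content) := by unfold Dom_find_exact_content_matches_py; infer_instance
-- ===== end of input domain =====

-- B replaces A's inner scan of new_content per old element by a dict from text to its ordered
-- list of new indices, consumed with a per-text cursor (objective: faster, O(n+m) vs O(n*m)).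

-- ===== PORT A =====
-- A's inner loop: 'for new_idx, new_text in enumerate(new_content): if new_idx not in used and old_text == new_text: … break'
def pvScanA (t : String) (used : PySem.Set Int) : List (Int × String) → Option Int
  | [] => none
  | p :: rest => if PySem.Set.contains used p.1 = false ∧ t = p.2 then some p.1 else pvScanA t used rest

-- body of A's outer loop: one old element p = (old_idx, old_text); state = (matches, used_new_indices)
def pvStepA (new_content : List String) (st : PySem.Dict Int Int × PySem.Set Int) (p : Int × String) :
    PySem.Dict Int Int × PySem.Set Int :=
  match pvScanA p.2 st.2 (PySem.List.enumerate new_content 0) with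
  | some i => (st.1.insert p.1 i, PySem.Set.add st.2 i)
  | none => st

def find_exact_content_matches_py (old_content : List String) (new_content : List String) : List (Int × Int) :=
  (((PySem.List.enumerate old_content 0).foldl (pvStepA new_content)
      (PySem.Dict.empty, PySem.Set.empty)).1).items

-- ===== PORT B =====
-- 'occurrences.setdefault(text, []).append(new_idx)' = occurrences[text] = occurrences.get(text, []) + [new_idx] = Dict.modify
def pvOcc (new_content : List String) : PySem.Dict String (List Int) :=
  (PySem.List.enumerate new_content 0).foldl
    (fun d p => d.modify p.2 [] (· ++ [p.1])) PySem.Dict.empty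

-- body of B's second loop; state = (matches, seen)
def pvStepB (occ : PySem.Dict String (List Int)) (st : PySem.Dict Int Int × PySem.Dict String Int)
    (p : Int × String) : PySem.Dict Int Int × PySem.Dict String Int :=
  let k := st.2.getD p.2 0
  let seen := st.2.insert p.2 (k + 1)
  let queue := occ.getD p.2 []
  if k < (queue.length : Int) then (st.1.insert p.1 (PySem.List.pyGetD queue k 0), seen)
  else (st.1, seen)

def find_exact_content_matches_py_alt (old_content : List String) (new_content : List String) : List (Int × Int) :=
  (((PySem.List.enumerate old_content 0).foldl (pvStepB (pvOcc new_content))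
      (PySem.Dict.empty, PySem.Dict.empty)).1).items

-- ===== PRECONDITION & SPEC =====
def Spec_find_exact_content_matches_py (old_content : List String) (new_content : List String) (out : List (Int × Int)) : Prop := out = find_exact_content_matches_py_alt old_content new_content
instance (old_content : List String) (new_content : List String) (out : List (Int × Int)) : Decidable (Spec_find_exact_content_matches_py old_content new_content out) := by unfold Spec_find_exact_content_matches_py; infer_instance

-- ===== CLAIM (what is proved, stated in full; the proofs are below) =====
def Claim_equal_find_exact_content_matches_py : Prop := ∀ (old_content : List String) (new_content : List String), Dom_find_exact_content_matches_py old_content new_content → Spec_find_exact_content_matches_py old_content new_content (find_exact_content_matches_py old_content new_content)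

-- ===== LEMMAS AND PROOFS =====

-- indices of the occurrences of t in new_content, in order
def pvIdxs (new_content : List String) (t : String) : List Int :=
  ((PySem.List.enumerate new_content 0).filter (fun p => p.2 == t)).map (·.1)

-- the new indices A has consumed after processing the old prefix P
def pvTaken (new_content : List String) (P : List String) (i : Int) : Prop :=
  ∃ t k, k < min (P.count t) (pvIdxs new_content t).length ∧ (pvIdxs new_content t)[k]? = some i

lemma mem_pvIdxs {new_content : List String} {t : String} {i : Int} :
    i ∈ pvIdxs new_content t ↔ ∃ (k : Nat) (h : k < new_content.length), i = (k : Int) ∧ new_content[k] = t := by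
  simp [pvIdxs, List.mem_filter, PySem.List.mem_enumerate_iff]

lemma nodup_pvIdxs (new_content : List String) (t : String) : (pvIdxs new_content t).Nodup := by
  have h2 := (PySem.List.pairwise_lt_enumerate (xs := new_content) (s := 0)).filter (fun p => p.2 == t)
  have h3 : (pvIdxs new_content t).Pairwise (· < ·) := by
    unfold pvIdxs; rw [List.pairwise_map]; exact h2
  exact h3.imp ne_of_lt

lemma pvIdxs_disjoint {new_content : List String} {t t' : String} {i : Int}
    (h : i ∈ pvIdxs new_content t) (h' : i ∈ pvIdxs new_content t') : t = t' := by
  obtain ⟨k, hk, rfl, rfl⟩ := mem_pvIdxs.mp h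
  obtain ⟨k', hk', he, rfl⟩ := mem_pvIdxs.mp h'
  have : k = k' := by exact_mod_cast he
  subst this; rfl

lemma pvOcc_getD (new_content : List String) (t : String) :
    (pvOcc new_content).getD t [] = pvIdxs new_content t := by
  unfold pvOcc
  have hswap : ((PySem.List.enumerate new_content 0).map (fun p => (p.2, p.1))).foldl
      (fun (d : PySem.Dict String (List Int)) q => d.modify q.1 [] (· ++ [q.2])) PySem.Dict.empty
      = (PySem.List.enumerate new_content 0).foldl
      (fun (d : PySem.Dict String (List Int)) p => d.modify p.2 [] (· ++ [p.1])) PySem.Dict.empty :=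
    List.foldl_map
  rw [← hswap, PySem.Dict.getD_foldl_modify_append]
  simp [pvIdxs, List.filter_map, Function.comp_def]

lemma pvScanA_eq (t : String) (used : PySem.Set Int) (ps : List (Int × String)) :
    pvScanA t used ps
      = ((ps.filter (fun p => !(PySem.Set.contains used p.1) && (t == p.2))).map (·.1)).head? := by
  induction ps with
  | nil => rfl
  | cons p rest ih =>
    simp only [pvScanA, List.filter_cons]
    by_cases hc : PySem.Set.contains used p.1 = false
    · by_cases ht : t = p.2
      · rw [if_pos ⟨hc, ht⟩, if_pos (by rw [hc, ht]; simp)]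
        simp only [List.map_cons, List.head?_cons]
      · rw [if_neg (fun hh => ht hh.2), if_neg (by simp [ht]), ih]
    · have hc' : PySem.Set.contains used p.1 = true := by simpa using hc
      rw [if_neg (fun hh => hc hh.1), if_neg (by simp only [hc', Bool.not_true, Bool.false_and]; exact Bool.false_ne_true), ih]

lemma filter_eq_drop_of_prefix_false {α : Type} (l : List α) (Q : α → Bool) (m : Nat)
    (hm : m ≤ l.length) (h : ∀ j (hj : j < l.length), (Q l[j] = true ↔ m ≤ j)) :
    l.filter Q = l.drop m := by
  induction l generalizing m with
  | nil => simp
  | cons x xs ih =>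
    cases m with
    | zero =>
      have hall : ∀ a ∈ x :: xs, Q a = true := by
        intro a ha
        obtain ⟨j, hj, rfl⟩ := List.mem_iff_getElem.mp ha
        exact (h j hj).mpr (Nat.zero_le _)
      simp [List.filter_eq_self.mpr hall]
    | succ m =>
      have hx : Q x = false := by
        have h0 := h 0 (Nat.succ_pos _)
        simp only [List.getElem_cons_zero] at h0
        by_cases hQx : Q x = true
        · exact absurd (h0.mp hQx) (by omega)
        · simpa using hQx
      rw [List.filter_cons_of_neg (by simp [hx]), List.drop_succ_cons]
      exact ih m (by simpa using hm) (fun j hj => by simpa using h (j+1) (by simpa))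

lemma pvTaken_getElem_iff {new_content : List String} (P : List String) (t : String) (j : Nat)
    (hj : j < (pvIdxs new_content t).length) :
    pvTaken new_content P ((pvIdxs new_content t)[j]) ↔ j < min (P.count t) (pvIdxs new_content t).length := by
  constructor
  · rintro ⟨t', k, hk, hks⟩
    have hmem' : (pvIdxs new_content t)[j] ∈ pvIdxs new_content t' := List.mem_of_getElem? hks
    have hmem : (pvIdxs new_content t)[j] ∈ pvIdxs new_content t := List.getElem_mem hj
    have htt : t' = t := pvIdxs_disjoint hmem' hmem
    rw [htt] at hk hks
    have hkl : k < (pvIdxs new_content t).length := lt_of_lt_of_le hk (Nat.min_le_right _ _)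
    rw [List.getElem?_eq_getElem hkl] at hks
    have he : (pvIdxs new_content t)[k] = (pvIdxs new_content t)[j] := Option.some_injective _ hks
    have : k = j := (List.Nodup.getElem_inj_iff (nodup_pvIdxs new_content t)).mp he
    omega
  · intro hj'
    exact ⟨t, j, hj', by rw [List.getElem?_eq_getElem hj]⟩

-- A's inner scan, under the invariant, returns exactly the next queue element
lemma pvScanA_result {new_content : List String} (P : List String) (t : String) (used : PySem.Set Int)
    (hused : ∀ i, PySem.Set.contains used i = true ↔ pvTaken new_content P i) :
    pvScanA t used (PySem.List.enumerate new_content 0)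
      = (pvIdxs new_content t)[min (P.count t) (pvIdxs new_content t).length]? := by
  rw [pvScanA_eq]
  have h1 : (PySem.List.enumerate new_content 0).filter (fun p => !(PySem.Set.contains used p.1) && (t == p.2))
      = ((PySem.List.enumerate new_content 0).filter (fun p => p.2 == t)).filter
          (fun p => !(PySem.Set.contains used p.1)) := by
    rw [List.filter_filter]
    apply List.filter_congr
    intro p _
    rw [Bool.beq_comm]
  rw [h1]
  have h2 : (((PySem.List.enumerate new_content 0).filter (fun p => p.2 == t)).filter
        (fun p => !(PySem.Set.contains used p.1))).map (·.1)
      = (pvIdxs new_content t).filter (fun i => !(PySem.Set.contains used i)) := by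
    unfold pvIdxs
    rw [List.filter_map]
    rfl
  rw [h2]
  have h3 : (pvIdxs new_content t).filter (fun i => !(PySem.Set.contains used i))
      = (pvIdxs new_content t).drop (min (P.count t) (pvIdxs new_content t).length) := by
    apply filter_eq_drop_of_prefix_false _ _ _ (Nat.min_le_right _ _)
    intro j hj
    constructor
    · intro hb
      by_contra hlt
      have hc : PySem.Set.contains used (pvIdxs new_content t)[j] = true :=
        (hused _).mpr ((pvTaken_getElem_iff P t j hj).mpr (by omega))
      rw [hc] at hb; exact absurd hb (by simp)
    · intro hm
      by_cases hc : PySem.Set.contains used (pvIdxs new_content t)[j] = true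
      · have := (pvTaken_getElem_iff P t j hj).mp ((hused _).mp hc)
        omega
      · simp only [Bool.not_eq_true] at hc
        rw [hc]; rfl
  rw [h3, List.head?_drop]

lemma pvTaken_append_lt {new_content : List String} (P : List String) (t : String)
    (hcl : P.count t < (pvIdxs new_content t).length) (j : Int) :
    pvTaken new_content (P ++ [t]) j ↔ pvTaken new_content P j ∨ j = (pvIdxs new_content t)[P.count t] := by
  constructor
  · rintro ⟨t', k, hk, hks⟩
    by_cases ht' : t' = t
    · rw [ht'] at hk hks
      have hcnt : (P ++ [t]).count t = P.count t + 1 := by simp [List.count_append]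
      rw [hcnt] at hk
      by_cases hkc : k < P.count t
      · exact Or.inl ⟨t, k, by omega, hks⟩
      · have hkk : k = P.count t := by omega
        subst hkk
        rw [List.getElem?_eq_getElem hcl] at hks
        exact Or.inr (Option.some_injective _ hks).symm
    · have hcnt : (P ++ [t]).count t' = P.count t' := by
        have h0 : [t].count t' = 0 := by rw [List.count_eq_zero]; simp [ht']
        simp [List.count_append, h0]
      rw [hcnt] at hk
      exact Or.inl ⟨t', k, hk, hks⟩
  · rintro (⟨t', k, hk, hks⟩ | rfl)
    · refine ⟨t', k, ?_, hks⟩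
      have : P.count t' ≤ (P ++ [t]).count t' := by simp [List.count_append]
      omega
    · refine ⟨t, P.count t, ?_, by rw [List.getElem?_eq_getElem hcl]⟩
      have hcnt : (P ++ [t]).count t = P.count t + 1 := by simp [List.count_append]
      omega

lemma pvTaken_append_ge {new_content : List String} (P : List String) (t : String)
    (hcl : ¬ P.count t < (pvIdxs new_content t).length) (j : Int) :
    pvTaken new_content (P ++ [t]) j ↔ pvTaken new_content P j := by
  constructor
  · rintro ⟨t', k, hk, hks⟩
    by_cases ht' : t' = t
    · rw [ht'] at hk hks
      have hcnt : (P ++ [t]).count t = P.count t + 1 := by simp [List.count_append]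
      rw [hcnt] at hk
      exact ⟨t, k, by omega, hks⟩
    · have hcnt : (P ++ [t]).count t' = P.count t' := by
        have h0 : [t].count t' = 0 := by rw [List.count_eq_zero]; simp [ht']
        simp [List.count_append, h0]
      rw [hcnt] at hk
      exact ⟨t', k, hk, hks⟩
  · rintro ⟨t', k, hk, hks⟩
    refine ⟨t', k, ?_, hks⟩
    have : P.count t' ≤ (P ++ [t]).count t' := by simp [List.count_append]
    omega

lemma pvSeen_invariant (P : List String) (t : String) (seen : PySem.Dict String Int)
    (hseen : ∀ t', seen.getD t' 0 = (P.count t' : Int)) (t' : String) :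
    (seen.insert t (seen.getD t 0 + 1)).getD t' 0 = ((P ++ [t]).count t' : Int) := by
  by_cases ht' : t' = t
  · subst ht'
    rw [PySem.Dict.getD_insert_self, hseen t']
    have : (P ++ [t']).count t' = P.count t' + 1 := by simp [List.count_append]
    rw [this]; push_cast; ring
  · rw [PySem.Dict.getD_insert_of_ne _ _ _ ht', hseen t']
    have h0 : [t].count t' = 0 := by rw [List.count_eq_zero]; simp [ht']
    simp [List.count_append, h0]

lemma pvMain (new_content : List String) (rest : List String) :
    ∀ (s : Int) (P : List String) (dA : PySem.Dict Int Int) (used : PySem.Set Int)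
      (dB : PySem.Dict Int Int) (seen : PySem.Dict String Int),
      dA = dB →
      (∀ t, seen.getD t 0 = (P.count t : Int)) →
      (∀ i, PySem.Set.contains used i = true ↔ pvTaken new_content P i) →
      ((PySem.List.enumerate rest s).foldl (pvStepA new_content) (dA, used)).1
        = ((PySem.List.enumerate rest s).foldl (pvStepB (pvOcc new_content)) (dB, seen)).1 := by
  induction rest with
  | nil =>
    intro s P dA used dB seen hAB _ _
    simpa [PySem.List.enumerate_nil] using hAB
  | cons t rest ih =>
    intro s P dA used dB seen hAB hseen hused
    rw [PySem.List.enumerate_cons, List.foldl_cons, List.foldl_cons]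
    have hscan := pvScanA_result P t used hused
    by_cases hcl : P.count t < (pvIdxs new_content t).length
    · have hm : min (P.count t) (pvIdxs new_content t).length = P.count t :=
        Nat.min_eq_left (Nat.le_of_lt hcl)
    -- the matched new index
      have hstepA : pvStepA new_content (dA, used) (s, t)
          = (dA.insert s ((pvIdxs new_content t)[P.count t]), PySem.Set.add used ((pvIdxs new_content t)[P.count t])) := by
        simp only [pvStepA, hscan, hm, List.getElem?_eq_getElem hcl]
      have hstepB : pvStepB (pvOcc new_content) (dB, seen) (s, t)
          = (dB.insert s ((pvIdxs new_content t)[P.count t]), seen.insert t ((P.count t : Int) + 1)) := by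
        simp only [pvStepB, hseen t, pvOcc_getD]
        rw [if_pos (by exact_mod_cast hcl)]
        rw [PySem.List.pyGetD_natCast, List.getD_eq_getElem _ _ hcl]
      rw [hstepA, hstepB]
      apply ih (s+1) (P ++ [t]) _ _ _ _ (by rw [hAB])
      · intro t'
        have := pvSeen_invariant P t seen hseen t'
        rw [hseen t] at this
        exact this
      · intro i
        rw [PySem.Set.contains_iff, PySem.Set.mem_add, pvTaken_append_lt P t hcl i]
        rw [← PySem.Set.contains_iff, hused i]
    · have hm : min (P.count t) (pvIdxs new_content t).length = (pvIdxs new_content t).length :=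
        Nat.min_eq_right (Nat.le_of_not_lt hcl)
      have hstepA : pvStepA new_content (dA, used) (s, t) = (dA, used) := by
        simp only [pvStepA, hscan, hm, List.getElem?_eq_none (Nat.le_refl _)]
      have hstepB : pvStepB (pvOcc new_content) (dB, seen) (s, t)
          = (dB, seen.insert t ((P.count t : Int) + 1)) := by
        simp only [pvStepB, hseen t, pvOcc_getD]
        rw [if_neg (by intro hh; exact hcl (by exact_mod_cast hh))]
      rw [hstepA, hstepB]
      apply ih (s+1) (P ++ [t]) _ _ _ _ hAB
      · intro t'
        have := pvSeen_invariant P t seen hseen t'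
        rw [hseen t] at this
        exact this
      · intro i
        rw [hused i, pvTaken_append_ge P t hcl i]

-- ===== VERDICT (by name: the statement is the Claim_ definition above) =====
theorem find_exact_content_matches_py_spec : Claim_equal_find_exact_content_matches_py := by
  intro old_content new_content _
  unfold Spec_find_exact_content_matches_py
  unfold find_exact_content_matches_py find_exact_content_matches_py_alt
  have h := pvMain new_content old_content 0 [] PySem.Dict.empty PySem.Set.empty PySem.Dict.empty PySem.Dict.empty rfl
    (by intro t; simp [PySem.Dict.getD, PySem.Dict.get?, PySem.Dict.empty])
    (by intro i; simp [PySem.Set.contains, PySem.Set.empty, pvTaken])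
  rw [h]
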